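-- pv_equiv track=rewrite | github.com/KyuboNoh/1_Foundation_MVT | Common/Unifying/Labels_TwoDatasets/datasets.py | _count_pn_lookup
-- ===== SOURCE A (Python) =====
-- from typing import Any, Dict, Iterable, List, Optional, Sequence, Tuple, TYPE_CHECKING
--
-- def _count_pn_lookup(
--     pn_lookup: Optional[Dict[str, set[Tuple[str, int, int]]]],
--     region_filter: Optional[Sequence[str]] = None,
-- ) -> Dict[str, int]:
--     if not pn_lookup:
--         return {"positive": 0, "negative": 0}
--
--     def _normalise_region(value: Optional[object]) -> str:
--         if value is None:
--             return "NONE"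
--         return str(value).upper()
--
--     allowed_regions: Optional[set[str]] = None
--     if region_filter:
--         allowed_regions = {str(region).upper() for region in region_filter if region is not None}
--
--     def _count(entries: Iterable[Tuple[str, int, int]]) -> int:
--         if entries is None:
--             return 0
--         if not allowed_regions:
--             return sum(1 for _ in entries)
--
--         total = 0
--         for region_value, _, _ in entries:
--             region_key = _normalise_region(region_value)
--             if region_key in allowed_regions:
--                 total += 1
--             elif region_key == "NONE" and ("GLOBAL" in allowed_regions or "ALL" in allowed_regions):
--                 total += 1
--         return total
--
--     pos = _count(pn_lookup.get("pos", ()))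
--     neg = _count(pn_lookup.get("neg", ()))
--     return {"positive": int(pos), "negative": int(neg)}
-- ===== SOURCE B (Python) =====
-- def _count_pn_lookup(pn_lookup, region_filter=None):
--     if not pn_lookup:
--         return {"positive": 0, "negative": 0}
--
--     allowed = {str(r).upper() for r in (region_filter or ()) if r is not None}
--
--     def tally(entries):
--         if entries is None:
--             return 0
--         if not allowed:
--             return int(len(entries))
--         buckets = {}
--         for rv, _, _ in entries:
--             k = "NONE" if rv is None else str(rv).upper()
--             buckets[k] = buckets.get(k, 0) + 1
--         total = sum(n for k, n in buckets.items() if k in allowed)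
--         if "NONE" not in allowed and not allowed.isdisjoint(("GLOBAL", "ALL")):
--             total += buckets.get("NONE", 0)
--         return int(total)
--
--     return {label: tally(pn_lookup.get(key, ()))
--             for label, key in (("positive", "pos"), ("negative", "neg"))}
-- ===== Notes on version B (the rewrite author's own statement) =====
-- stated objective: alternative
-- what changed: B builds a dict of counts per normalised region key in one pass and then sums the counter's own items filtered by membership in the allowed set (plus the guarded NONE bucket via set.isdisjoint), builds the allowed set unconditionally from 'region_filter or ()', uses len() on the no-filter path, and produces the result dict by a comprehension over (label, key) pairs instead of two explicit calls.
import Mathlib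
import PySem

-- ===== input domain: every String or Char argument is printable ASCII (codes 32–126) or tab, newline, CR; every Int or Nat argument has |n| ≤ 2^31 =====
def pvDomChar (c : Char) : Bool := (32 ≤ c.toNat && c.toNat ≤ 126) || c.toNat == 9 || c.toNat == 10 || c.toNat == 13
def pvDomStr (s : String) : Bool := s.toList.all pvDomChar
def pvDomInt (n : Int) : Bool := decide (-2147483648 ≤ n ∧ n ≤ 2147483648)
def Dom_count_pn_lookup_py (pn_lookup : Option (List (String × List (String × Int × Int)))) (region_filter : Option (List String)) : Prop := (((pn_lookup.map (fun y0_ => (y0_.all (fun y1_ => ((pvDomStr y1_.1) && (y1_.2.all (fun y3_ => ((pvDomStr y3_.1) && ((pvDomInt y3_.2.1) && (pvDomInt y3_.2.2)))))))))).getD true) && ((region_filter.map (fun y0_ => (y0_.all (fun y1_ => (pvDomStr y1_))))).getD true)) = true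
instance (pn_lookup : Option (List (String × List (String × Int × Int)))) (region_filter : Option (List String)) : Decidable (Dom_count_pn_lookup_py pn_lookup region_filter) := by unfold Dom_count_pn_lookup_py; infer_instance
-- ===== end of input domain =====

-- B builds a per-key counting dict and sums the counter's items filtered by the allowed
-- set (alternative decomposition, not claimed faster).

-- ===== PORT A =====
-- literal port of A: per-entry loop, +1 when the normalised key is allowed or the
-- GLOBAL/ALL fallback applies ('region is None' never fires: regions are String here)
def pvCountA (allowed : Option (PySem.Set String)) (entries : List (String × Int × Int)) : Int :=
  match allowed with
  | none => entries.foldl (fun acc _ => acc + 1) 0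
  | some s =>
    if s = [] then entries.foldl (fun acc _ => acc + 1) 0
    else
      entries.foldl (fun total e =>
        let key := PySem.Str.upper e.1
        if PySem.Set.contains s key then total + 1
        else if key == "NONE" && (PySem.Set.contains s "GLOBAL" || PySem.Set.contains s "ALL") then total + 1
        else total) 0

def count_pn_lookup_py (pn_lookup : Option (List (String × List (String × Int × Int)))) (region_filter : Option (List String)) : List (String × Int) :=
  match pn_lookup with
  | none => [("positive", 0), ("negative", 0)]
  | some d =>
    if d = [] then [("positive", 0), ("negative", 0)]
    else
      let allowed : Option (PySem.Set String) :=
        match region_filter with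
        | none => none
        | some rf => if rf = [] then none else some (PySem.Set.ofList (rf.map (fun r => PySem.Str.upper r)))
      let pos := pvCountA allowed ((PySem.Dict.mk d).getD "pos" [])
      let neg := pvCountA allowed ((PySem.Dict.mk d).getD "neg" [])
      [("positive", pos), ("negative", neg)]

-- ===== PORT B =====
-- literal port of B: allowed = {str(r).upper() for r in (region_filter or ())};
-- buckets[k] = buckets.get(k, 0) + 1 over the entries, then
-- sum(n for k, n in buckets.items() if k in allowed) plus the NONE bucket guarded
-- by 'NONE' not in allowed and not allowed.isdisjoint(("GLOBAL", "ALL"))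
def pvAllowedB (region_filter : Option (List String)) : PySem.Set String :=
  PySem.Set.ofList ((region_filter.getD []).map (fun r => PySem.Str.upper r))

def pvTallyB (allowed : PySem.Set String) (entries : List (String × Int × Int)) : Int :=
  if allowed = [] then (entries.length : Int)
  else
    let buckets := entries.foldl
      (fun d e => d.insert (PySem.Str.upper e.1) (d.getD (PySem.Str.upper e.1) 0 + 1))
      (PySem.Dict.empty : PySem.Dict String Int)
    let total := ((buckets.items.filter (fun kv => PySem.Set.contains allowed kv.1)).map (fun kv => kv.2)).sum
    if !PySem.Set.contains allowed "NONE" && !PySem.Set.isdisjoint allowed ["GLOBAL", "ALL"] then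
      total + buckets.getD "NONE" 0
    else total

def count_pn_lookup_py_alt (pn_lookup : Option (List (String × List (String × Int × Int)))) (region_filter : Option (List String)) : List (String × Int) :=
  match pn_lookup with
  | none => [("positive", 0), ("negative", 0)]
  | some d =>
    if d = [] then [("positive", 0), ("negative", 0)]
    else
      let allowed := pvAllowedB region_filter
      [("positive", "pos"), ("negative", "neg")].map
        (fun lk => (lk.1, pvTallyB allowed ((PySem.Dict.mk d).getD lk.2 [])))

-- ===== PRECONDITION & SPEC =====
def Spec_count_pn_lookup_py (pn_lookup : Option (List (String × List (String × Int × Int)))) (region_filter : Option (List String)) (out : List (String × Int)) : Prop := out = count_pn_lookup_py_alt pn_lookup region_filter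
instance (pn_lookup : Option (List (String × List (String × Int × Int)))) (region_filter : Option (List String)) (out : List (String × Int)) : Decidable (Spec_count_pn_lookup_py pn_lookup region_filter out) := by unfold Spec_count_pn_lookup_py; infer_instance

-- ===== CLAIM (what is proved, stated in full; the proofs are below) =====
def Claim_equal_count_pn_lookup_py : Prop := ∀ (pn_lookup : Option (List (String × List (String × Int × Int)))) (region_filter : Option (List String)), Dom_count_pn_lookup_py pn_lookup region_filter → Spec_count_pn_lookup_py pn_lookup region_filter (count_pn_lookup_py pn_lookup region_filter)

-- ===== LEMMAS AND PROOFS =====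

-- the membership test A applies per entry, and the NONE-fallback condition
def pvOk (s : PySem.Set String) (k : String) : Bool :=
  PySem.Set.contains s k || (k == "NONE" && (PySem.Set.contains s "GLOBAL" || PySem.Set.contains s "ALL"))

def pvFb (s : PySem.Set String) : Bool :=
  !PySem.Set.contains s "NONE" && (PySem.Set.contains s "GLOBAL" || PySem.Set.contains s "ALL")

theorem pv_if_collapse (a b : Bool) (X Y : Int) :
    (if a then X else if b then X else Y) = (if (a || b) then X else Y) := by
  cases a <;> cases b <;> simp

theorem pv_foldl_len (entries : List (String × Int × Int)) (c : Int) :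
    entries.foldl (fun acc _ => acc + 1) c = c + entries.length := by
  induction entries generalizing c with
  | nil => simp
  | cons x t ih => simp [List.foldl, ih]; omega

theorem pv_sum_map_add (s : List String) (f g : String → Int) :
    (s.map (fun r => f r + g r)).sum = (s.map f).sum + (s.map g).sum := by
  induction s with
  | nil => simp
  | cons a t ih => simp [ih]; ring

theorem pv_indicator (x : String) (s : List String) (hs : s.Nodup) :
    (s.map (fun r => if x == r then (1:Int) else 0)).sum
      = if PySem.Set.contains s x then 1 else 0 := by
  induction s with
  | nil => simp [PySem.Set.contains]
  | cons a t ih =>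
    rcases List.nodup_cons.mp hs with ⟨ha, ht⟩
    rw [List.map_cons, List.sum_cons]
    by_cases hx : x = a
    · subst hx
      have hxt : (t.map (fun r => if x == r then (1:Int) else 0)).sum = 0 := by
        apply List.sum_eq_zero
        intro y hy
        rcases List.mem_map.mp hy with ⟨r, hr, rfl⟩
        have hne : (x == r) = false := by
          simp only [beq_eq_false_iff_ne, ne_eq]
          rintro rfl; exact ha hr
        simp [hne]
      rw [hxt]
      simp [PySem.Set.contains]
    · have hne : (x == a) = false := by simp [hx]
      rw [hne, ih ht]
      simp [PySem.Set.contains, hx]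

theorem pv_key (s : List String) (hs : s.Nodup) (L : List String) :
    ((L.countP (pvOk s) : Nat) : Int)
      = (s.map (fun r => (L.count r : Int))).sum
        + (if pvFb s then (L.count "NONE" : Int) else 0) := by
  induction L with
  | nil => simp
  | cons x t ih =>
    rw [List.countP_cons]
    have hmap : (s.map (fun r => (((x :: t).count r : Nat) : Int))).sum
        = (s.map (fun r => (t.count r : Int))).sum + (s.map (fun r => if x == r then (1:Int) else 0)).sum := by
      rw [← pv_sum_map_add]
      apply congrArg
      apply List.map_congr_left
      intro r _
      rw [List.count_cons]
      push_cast
      split <;> simp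
    push_cast
    rw [ih, hmap, pv_indicator x s hs, List.count_cons]
    simp only [pvOk, pvFb] at *
    by_cases hx : x = "NONE"
    · subst hx
      by_cases hC : "NONE" ∈ s <;>
        by_cases hG : ("GLOBAL" ∈ s ∨ "ALL" ∈ s) <;>
          simp [hC, hG] <;> push_cast <;> ring
    · have hb : (x == "NONE") = false := by simp [hx]
      by_cases hC : x ∈ s <;> simp [hb, hC] <;> split <;> push_cast <;> ring

-- summing the counter's buckets whose key is allowed = summing counts over the allowed set
theorem pv_sum_drop (s L : List String) :
    (s.map (fun r => (L.count r : Int))).sum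
      = ((s.filter (fun r => decide (r ∈ L))).map (fun r => (L.count r : Int))).sum := by
  induction s with
  | nil => simp
  | cons a t ih =>
    by_cases ha : a ∈ L
    · simp [ha, ih]
    · simp [ha, List.count_eq_zero_of_not_mem ha, ih]

theorem pv_sum_filter (s : List String) (hs : s.Nodup) (L : List String) :
    (((PySem.Set.ofList L).filter (fun k => PySem.Set.contains s k)).map
        (fun k => (L.count k : Int))).sum
      = (s.map (fun r => (L.count r : Int))).sum := by
  conv_rhs => rw [pv_sum_drop]
  have hperm : ((PySem.Set.ofList L).filter (fun k => PySem.Set.contains s k)).Perm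
      (s.filter (fun r => decide (r ∈ L))) := by
    rw [List.perm_ext_iff_of_nodup (List.Nodup.filter _ (PySem.Set.nodup_ofList L))
      (List.Nodup.filter _ hs)]
    intro a
    simp [List.mem_filter, PySem.Set.mem_ofList, PySem.Set.contains, and_comm]
  exact List.Perm.sum_eq (hperm.map _)

-- B's fallback test written with isdisjoint equals A's disjunction
theorem pv_fb_eq (s : PySem.Set String) :
    (!PySem.Set.contains s "NONE" && !PySem.Set.isdisjoint s ["GLOBAL", "ALL"])
      = pvFb s := by
  have h : (!PySem.Set.isdisjoint s ["GLOBAL", "ALL"])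
      = (PySem.Set.contains s "GLOBAL" || PySem.Set.contains s "ALL") := by
    rw [Bool.eq_iff_iff]
    simp [PySem.Set.isdisjoint, PySem.Set.contains]
    constructor
    · rintro ⟨x, hx, h | h⟩ <;> subst h <;> simp [hx]
    · rintro (h | h)
      · exact ⟨"GLOBAL", h, Or.inl rfl⟩
      · exact ⟨"ALL", h, Or.inr rfl⟩
  rw [h, pvFb]

theorem pv_main (s : PySem.Set String) (hs : List.Nodup s) (hne : s ≠ [])
    (entries : List (String × Int × Int)) :
    pvCountA (some s) entries = pvTallyB s entries := by
  have hA : pvCountA (some s) entries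
      = (0 : Int) + ((entries.countP (fun e => pvOk s (PySem.Str.upper e.1)) : Nat) : Int) := by
    simp only [pvCountA]
    rw [if_neg hne]
    have hfun : (fun (total : Int) (e : String × Int × Int) =>
        let key := PySem.Str.upper e.1
        if PySem.Set.contains s key then total + 1
        else if key == "NONE" && (PySem.Set.contains s "GLOBAL" || PySem.Set.contains s "ALL") then total + 1
        else total)
      = (fun (total : Int) (e : String × Int × Int) =>
          if pvOk s (PySem.Str.upper e.1) then total + 1 else total) := by
      funext total e
      exact pv_if_collapse _ _ _ _
    rw [hfun, PySem.List.foldl_if_add_one]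
  have hcnt : (entries.map (fun e => PySem.Str.upper e.1)).countP (pvOk s)
      = entries.countP (fun e => pvOk s (PySem.Str.upper e.1)) := List.countP_map
  have hbuck : entries.foldl
      (fun d e => d.insert (PySem.Str.upper e.1) (d.getD (PySem.Str.upper e.1) 0 + 1))
      (PySem.Dict.empty : PySem.Dict String Int)
    = PySem.Dict.counter (entries.map (fun e => PySem.Str.upper e.1)) := by
    rw [← PySem.Dict.foldl_insert_getD_add_one_eq_counter, List.foldl_map]
  set M := entries.map (fun e => PySem.Str.upper e.1) with hM
  have hitems : (((PySem.Dict.counter M).items.filter (fun kv => PySem.Set.contains s kv.1)).map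
      (fun kv => kv.2)).sum
    = (((PySem.Set.ofList M).filter (fun k => PySem.Set.contains s k)).map
        (fun k => (M.count k : Int))).sum := by
    rw [PySem.Dict.items_counter, List.filter_map, List.map_map]
    rfl
  have hB : pvTallyB s entries
      = ((s.map (fun r => (M.count r : Int))).sum
         + (if pvFb s then (M.count "NONE" : Int) else 0)) := by
    simp only [pvTallyB]
    rw [if_neg hne, hbuck, hitems, pv_sum_filter s hs M, pv_fb_eq,
      PySem.Dict.getD_counter]
    split <;> simp
  rw [hA, hB, zero_add, ← hcnt, pv_key s hs]

theorem pv_none_eq (entries : List (String × Int × Int)) :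
    pvCountA none entries = pvTallyB (PySem.Set.ofList []) entries := by
  simp [pvCountA, pvTallyB, PySem.Set.ofList, pv_foldl_len]

-- ===== VERDICT (by name: the statement is the Claim_ definition above) =====
theorem count_pn_lookup_py_spec : Claim_equal_count_pn_lookup_py := by
  intro pn rf _
  unfold Spec_count_pn_lookup_py count_pn_lookup_py count_pn_lookup_py_alt
  cases pn with
  | none => rfl
  | some d =>
    by_cases hd : d = []
    · simp [hd]
    · simp only [if_neg hd, List.map_cons, List.map_nil]
      cases rf with
      | none => simp only [pvAllowedB, Option.getD, List.map_nil, pv_none_eq]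
      | some l =>
        by_cases hl : l = []
        · subst hl
          simp [pvAllowedB, pv_none_eq]
        · have hne : PySem.Set.ofList (l.map (fun r => PySem.Str.upper r)) ≠ [] := by
            cases l with
            | nil => exact absurd rfl hl
            | cons a t =>
              have hmem : PySem.Str.upper a ∈
                  PySem.Set.ofList ((a :: t).map (fun r => PySem.Str.upper r)) := by
                rw [PySem.Set.mem_ofList]; simp
              exact List.ne_nil_of_mem hmem
          simp only [if_neg hl, pvAllowedB, Option.getD,
            pv_main _ (PySem.Set.nodup_ofList _) hne]
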